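-- pv_equiv track=rewrite | github.com/gonzaherman99/C4533-GroupProject | problem2_task4.py | dp_problem2_n2k
-- ===== SOURCE A (Python) =====
-- def dp_problem2_n2k(A, k):
--     """
--     Dynamic Programming solution for Problem 2
--     Time Complexity: O(m * n^(2k))
--
--     Approach:
--         - Find all profitable pairs for each stock
--         - Sort pairs by profit
--         - Select up to k pairs with no overlapping days
--
--     Assume:
--         - A[i][j] gives the price of stock i on day j
--         - Returns up to k transactions
--         - No overlapping days between transactions
--     """
--     m, n = len(A), len(A[0])
--     transactions = []
--
--     # Collect all profitable transactions
--     all_profits = []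
--     # Iterate through all stocks
--     for i in range(m):
--         for buy in range(n):
--             for sell in range(buy + 1, n):
--                 # Calculate profit
--                 profit = A[i][sell] - A[i][buy]
--                 if profit > 0:
--                     all_profits.append((profit, i, buy, sell))
--
--     # Sort by descending profit
--     all_profits.sort(reverse=True)
--     # Set instead of List for better time complexity in checking used days
--     used_days = set()
--     count = 0
--     for profit, i, buy, sell in all_profits:
--         # Makes sure no days overlap with previous transactions
--         if all(day not in used_days for day in range(buy, sell + 1)):
--             # Convert to 1-based index and add to transactions
--             transactions.append((i + 1, buy + 1, sell + 1))
--             used_days.update(range(buy, sell + 1))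
--             count += 1
--             if count == k:
--                 break
--
--     if not transactions:
--         return []
--     else:
--         return transactions
-- ===== SOURCE B (Python) =====
-- def dp_problem2_n2k(A, k):
--     """Selection-style greedy: instead of materialising and sorting every
--     profitable pair, repeatedly re-scan the price matrix for the single best
--     transaction compatible with the days already used, until k transactions
--     are taken or none remains."""
--     n = len(A[0])
--     used = []   # disjoint [lo, hi] day intervals already taken
--     out = []
--     while True:
--         best = None
--         for i in range(len(A)):
--             row = A[i]
--             for buy in range(n):
--                 for sell in range(buy + 1, n):
--                     gain = row[sell] - row[buy]
--                     if gain > 0 and all(sell < lo or hi < buy for lo, hi in used):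
--                         c = (gain, i, buy, sell)
--                         if best is None or c > best:
--                             best = c
--         if best is None:
--             break
--         gain, i, buy, sell = best
--         out.append((i + 1, buy + 1, sell + 1))
--         used.append((buy, sell))
--         if len(out) == k:
--             break
--     return out
-- ===== Notes on version B (the rewrite author's own statement) =====
-- stated objective: alternative
-- what changed: B never builds or sorts the candidate list: it is a selection-style greedy that repeatedly re-scans the price matrix for the single best transaction compatible with the disjoint day intervals already taken (proved equal to A's sort-then-scan because used days only grow, so the first compatible element of the sorted list is exactly the running maximum of a fresh scan).
-- outside the precondition, e.g. on dp_problem2_n2k([], 1): A raises IndexError, B raises IndexError; on dp_problem2_n2k([[1, 5], [2]], 1): A raises IndexError, B raises IndexError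
import Mathlib
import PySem

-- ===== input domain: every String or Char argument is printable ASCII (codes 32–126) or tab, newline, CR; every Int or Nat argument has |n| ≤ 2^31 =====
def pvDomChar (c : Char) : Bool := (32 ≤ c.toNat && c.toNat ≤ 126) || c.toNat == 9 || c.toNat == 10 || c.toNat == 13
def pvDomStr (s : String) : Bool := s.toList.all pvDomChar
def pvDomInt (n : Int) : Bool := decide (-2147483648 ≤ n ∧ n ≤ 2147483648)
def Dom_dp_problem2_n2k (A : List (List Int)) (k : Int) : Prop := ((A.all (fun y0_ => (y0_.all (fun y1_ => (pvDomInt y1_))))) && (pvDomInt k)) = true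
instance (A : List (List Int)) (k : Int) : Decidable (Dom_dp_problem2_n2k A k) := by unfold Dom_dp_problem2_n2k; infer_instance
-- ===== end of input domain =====

-- B replaces A's build-sort-scan pipeline by a selection-style greedy that never
-- materialises or sorts the candidate list: it repeatedly re-scans the matrix for
-- the single best transaction compatible with the used days; same return value.

-- ===== PORT A =====
-- selection loop of A: used_days is a Python set of days, count==k breaks after appending
def pvLoopA (k : Int) : List (Int × Int × Int × Int) → PySem.Set Int → Int → List (Int × Int × Int) → List (Int × Int × Int)
  | [], _, _, trs => trs
  | (_profit, i, buy, sell) :: rest, used, count, trs =>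
    if (PySem.List.pyRange buy (sell + 1) 1).all (fun day => !(PySem.Set.contains used day)) then
      let trs' := trs ++ [(i + 1, buy + 1, sell + 1)]
      let used' := PySem.Set.update used (PySem.List.pyRange buy (sell + 1) 1)
      let count' := count + 1
      if count' = k then trs' else pvLoopA k rest used' count' trs'
    else pvLoopA k rest used count trs

def pvGenA (A : List (List Int)) (m n : Int) : List (Int × Int × Int × Int) :=
  (PySem.List.pyRange 0 m 1).foldl (fun acc i =>
    (PySem.List.pyRange 0 n 1).foldl (fun acc buy =>
      (PySem.List.pyRange (buy + 1) n 1).foldl (fun acc sell =>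
        if PySem.List.pyGetD (PySem.List.pyGetD A i []) sell 0
             - PySem.List.pyGetD (PySem.List.pyGetD A i []) buy 0 > 0 then
          acc ++ [(PySem.List.pyGetD (PySem.List.pyGetD A i []) sell 0
                     - PySem.List.pyGetD (PySem.List.pyGetD A i []) buy 0, i, buy, sell)]
        else acc) acc) acc) []

def dp_problem2_n2k (A : List (List Int)) (k : Int) : List (Int × Int × Int) :=
  let m : Int := A.length
  let n : Int := ((PySem.List.pyGet? A 0).getD []).length   -- A[0]; IndexError on [] excluded by Pre_
  let allProfits := pvGenA A m n
  -- sort reverse=True; tuple comparison transcribed via the lexicographic order on equal-length Int lists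
  let sortedProfits := PySem.List.sorted allProfits (fun p => [p.1, p.2.1, p.2.2.1, p.2.2.2]) true
  let trs := pvLoopA k sortedProfits PySem.Set.empty 0 []
  if trs = [] then [] else trs

-- ===== PORT B =====
-- Python tuple key of a candidate (gain, i, buy, sell); tuple '>' is lex '<' on these lists
def pvKey (p : Int × Int × Int × Int) : List Int := [p.1, p.2.1, p.2.2.1, p.2.2.2]

-- all(sell < lo or hi < buy for lo, hi in used)
def pvCompat (used : List (Int × Int)) (buy sell : Int) : Bool :=
  used.all (fun iv => decide (sell < iv.1) || decide (iv.2 < buy))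

-- one full re-scan of the matrix for the best compatible candidate (Source B's inner triple loop)
def pvBestCand (A : List (List Int)) (n : Int) (used : List (Int × Int)) :
    Option (Int × Int × Int × Int) :=
  (PySem.List.pyRange 0 (A.length : Int) 1).foldl (fun best i =>
    (PySem.List.pyRange 0 n 1).foldl (fun best buy =>
      (PySem.List.pyRange (buy + 1) n 1).foldl (fun best sell =>
        if PySem.List.pyGetD (PySem.List.pyGetD A i []) sell 0
             - PySem.List.pyGetD (PySem.List.pyGetD A i []) buy 0 > 0
           ∧ pvCompat used buy sell then
          match best with
          | none => some (PySem.List.pyGetD (PySem.List.pyGetD A i []) sell 0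
                            - PySem.List.pyGetD (PySem.List.pyGetD A i []) buy 0, i, buy, sell)
          | some b =>
            if pvKey b < pvKey (PySem.List.pyGetD (PySem.List.pyGetD A i []) sell 0
                  - PySem.List.pyGetD (PySem.List.pyGetD A i []) buy 0, i, buy, sell) then
              some (PySem.List.pyGetD (PySem.List.pyGetD A i []) sell 0
                      - PySem.List.pyGetD (PySem.List.pyGetD A i []) buy 0, i, buy, sell)
            else best
        else best) best) best) none

-- Source B's while-True loop; the fuel only makes the loop total (one pick per iteration)
def pvLoopBfuel (A : List (List Int)) (n k : Int) :
    Nat → List (Int × Int) → List (Int × Int × Int) → List (Int × Int × Int)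
  | 0, _, out => out
  | fuel + 1, used, out =>
    match pvBestCand A n used with
    | none => out
    | some (_gain, i, buy, sell) =>
      let out' := out ++ [(i + 1, buy + 1, sell + 1)]
      let used' := used ++ [(buy, sell)]
      if (out'.length : Int) = k then out' else pvLoopBfuel A n k fuel used' out'

def dp_problem2_n2k_alt (A : List (List Int)) (k : Int) : List (Int × Int × Int) :=
  let n : Int := ((PySem.List.pyGet? A 0).getD []).length
  pvLoopBfuel A n k (A.length * n.toNat * n.toNat + 1) [] []

-- ===== PRECONDITION & SPEC =====
-- Pre_ excludes exactly the inputs where the Python A raises IndexError: the empty list (A[0])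
-- and, when n = len(A[0]) ≥ 2, a row shorter than n (A[i][sell] with sell ≤ n-1).
def Pre_dp_problem2_n2k (A : List (List Int)) (k : Int) : Prop :=
  A ≠ [] ∧ ((A.headD []).length < 2 ∨ ∀ row ∈ A, (A.headD []).length ≤ row.length)
instance (A : List (List Int)) (k : Int) : Decidable (Pre_dp_problem2_n2k A k) := by
  unfold Pre_dp_problem2_n2k; infer_instance

def pvWitness_dp_problem2_n2k : List (List Int) × Int := ([[3, 1, 4], [2, 2, 5]], 2)

def Spec_dp_problem2_n2k (A : List (List Int)) (k : Int) (out : List (Int × Int × Int)) : Prop := out = dp_problem2_n2k_alt A k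
instance (A : List (List Int)) (k : Int) (out : List (Int × Int × Int)) : Decidable (Spec_dp_problem2_n2k A k out) := by unfold Spec_dp_problem2_n2k; infer_instance

-- ===== CLAIM (what is proved, stated in full; the proofs are below) =====
def Claim_equal_dp_problem2_n2k : Prop := ∀ (A : List (List Int)) (k : Int), Dom_dp_problem2_n2k A k → Pre_dp_problem2_n2k A k → Spec_dp_problem2_n2k A k (dp_problem2_n2k A k)

-- ===== LEMMAS AND PROOFS =====

-- proof-side canonical candidate list (flatMap form of A's generator)
def pvCands (A : List (List Int)) (n : Int) : List (Int × Int × Int × Int) :=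
  (PySem.List.pyRange 0 (A.length : Int) 1).flatMap (fun i =>
    (PySem.List.pyRange 0 n 1).flatMap (fun buy =>
      ((PySem.List.pyRange (buy + 1) n 1).filter (fun sell =>
          decide (PySem.List.pyGetD (PySem.List.pyGetD A i []) sell 0
            - PySem.List.pyGetD (PySem.List.pyGetD A i []) buy 0 > 0))).map (fun sell =>
        (PySem.List.pyGetD (PySem.List.pyGetD A i []) sell 0
           - PySem.List.pyGetD (PySem.List.pyGetD A i []) buy 0, i, buy, sell))))

-- proof-side intermediate: A's greedy scan of the sorted list, with interval bookkeeping
def pvScan (k : Int) : List (Int × Int × Int × Int) → List (Int × Int) → List (Int × Int × Int) → List (Int × Int × Int)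
  | [], _, out => out
  | (_profit, i, buy, sell) :: rest, ivs, out =>
    if pvCompat ivs buy sell then
      let out' := out ++ [(i + 1, buy + 1, sell + 1)]
      let ivs' := ivs ++ [(buy, sell)]
      if (out'.length : Int) = k then out' else pvScan k rest ivs' out'
    else pvScan k rest ivs out

-- max-update step of Source B's re-scan, abstracted over the admissibility test q
def pvFStep (q : Int × Int × Int × Int → Bool)
    (best : Option (Int × Int × Int × Int)) (c : Int × Int × Int × Int) :
    Option (Int × Int × Int × Int) :=
  if q c then
    match best with
    | none => some c
    | some b => if pvKey b < pvKey c then some c else best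
  else best

theorem pvKey_inj (a b : Int × Int × Int × Int) (h : pvKey a = pvKey b) : a = b := by
  obtain ⟨a1, a2, a3, a4⟩ := a
  obtain ⟨b1, b2, b3, b4⟩ := b
  simp only [pvKey, List.cons.injEq, and_true] at h
  simp [h.1, h.2.1, h.2.2.1, h.2.2.2]

theorem pvGen_eq (A : List (List Int)) (n : Int) :
    pvGenA A (A.length : Int) n = pvCands A n := by
  unfold pvGenA pvCands
  rw [PySem.List.foldl_congr_mem' _ _
    (fun acc i => acc ++ (PySem.List.pyRange 0 n 1).flatMap (fun buy =>
      ((PySem.List.pyRange (buy + 1) n 1).filter (fun sell =>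
          decide (PySem.List.pyGetD (PySem.List.pyGetD A i []) sell 0
            - PySem.List.pyGetD (PySem.List.pyGetD A i []) buy 0 > 0))).map (fun sell =>
        (PySem.List.pyGetD (PySem.List.pyGetD A i []) sell 0
           - PySem.List.pyGetD (PySem.List.pyGetD A i []) buy 0, i, buy, sell)))) _ ?_]
  · rw [PySem.List.foldl_append_eq_flatMap]
    simp
  · intro i _ acc
    rw [PySem.List.foldl_congr_mem' _ _
      (fun acc buy => acc ++ ((PySem.List.pyRange (buy + 1) n 1).filter (fun sell =>
          decide (PySem.List.pyGetD (PySem.List.pyGetD A i []) sell 0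
            - PySem.List.pyGetD (PySem.List.pyGetD A i []) buy 0 > 0))).map (fun sell =>
        (PySem.List.pyGetD (PySem.List.pyGetD A i []) sell 0
           - PySem.List.pyGetD (PySem.List.pyGetD A i []) buy 0, i, buy, sell))) _ ?_]
    · rw [PySem.List.foldl_append_eq_flatMap]
    · intro buy _ acc
      have h := PySem.List.foldl_append_if
        (fun sell => decide (PySem.List.pyGetD (PySem.List.pyGetD A i []) sell 0
            - PySem.List.pyGetD (PySem.List.pyGetD A i []) buy 0 > 0))
        (fun sell => (PySem.List.pyGetD (PySem.List.pyGetD A i []) sell 0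
            - PySem.List.pyGetD (PySem.List.pyGetD A i []) buy 0, i, buy, sell))
        (PySem.List.pyRange (buy + 1) n 1) acc
      simpa using h

-- Source B's nested re-scan computes a fold of pvFStep over the canonical candidate list
theorem pvBest_eq_foldl (A : List (List Int)) (n : Int) (used : List (Int × Int)) :
    pvBestCand A n used
      = (pvCands A n).foldl (pvFStep (fun c => pvCompat used c.2.2.1 c.2.2.2)) none := by
  unfold pvBestCand pvCands
  rw [List.foldl_flatMap]
  apply PySem.List.foldl_congr_mem'
  intro i _ best
  rw [List.foldl_flatMap]
  apply PySem.List.foldl_congr_mem'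
  intro buy _ best
  rw [List.foldl_map, List.foldl_filter]
  apply PySem.List.foldl_congr_mem'
  intro sell _ best
  simp only [pvFStep]
  by_cases h1 : PySem.List.pyGetD (PySem.List.pyGetD A i []) sell 0
      - PySem.List.pyGetD (PySem.List.pyGetD A i []) buy 0 > 0 <;>
    by_cases h2 : pvCompat used buy sell = true <;>
    simp [h2]

-- the two instance routes to the lexicographic order on List Int give the same sorted list
theorem pvSorted_inst (l : List (Int × Int × Int × Int)) :
    @PySem.List.sorted _ (List Int) List.instLT (fun a b => a.decidableLT b) l pvKey true
      = @PySem.List.sorted _ (List Int) List.instLinearOrder.toLT LinearOrder.toDecidableLT l pvKey true := by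
  have h : (fun (a b : List Int) => a.decidableLT b)
      = (LinearOrder.toDecidableLT : DecidableLT (List Int)) := by
    funext a b; exact Subsingleton.elim _ _
  exact congrArg (fun d => @PySem.List.sorted _ (List Int) List.instLT d l pvKey true) h

theorem pvFStep_false (q : Int × Int × Int × Int → Bool)
    (acc : Option (Int × Int × Int × Int)) (x : Int × Int × Int × Int)
    (hq : q x = false) : pvFStep q acc x = acc := by
  simp [pvFStep, hq]

theorem pvFStep_true (q : Int × Int × Int × Int → Bool)
    (acc : Option (Int × Int × Int × Int)) (x : Int × Int × Int × Int)
    (hq : q x = true) :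
    ∃ c, pvFStep q acc x = some c ∧ pvKey x ≤ pvKey c ∧
      ∀ b, acc = some b → pvKey b ≤ pvKey c := by
  cases acc with
  | none => exact ⟨x, by simp [pvFStep, hq], le_refl _, by simp⟩
  | some b =>
    by_cases hlt : pvKey b < pvKey x
    · exact ⟨x, by simp [pvFStep, hq, hlt], le_refl _,
        fun b' hb' => by cases hb'; exact le_of_lt hlt⟩
    · exact ⟨b, by simp [pvFStep, hq, hlt], le_of_not_gt hlt,
        fun b' hb' => by cases hb'; exact le_refl _⟩

theorem pvFStep_some (q : Int × Int × Int × Int → Bool)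
    (acc : Option (Int × Int × Int × Int)) (x c : Int × Int × Int × Int)
    (h : pvFStep q acc x = some c) : acc = some c ∨ (c = x ∧ q x = true) := by
  by_cases hq : q x = true
  · cases acc with
    | none =>
      simp only [pvFStep, hq, if_true, Option.some.injEq] at h
      exact Or.inr ⟨h.symm, hq⟩
    | some b =>
      by_cases hlt : pvKey b < pvKey x
      · simp only [pvFStep, hq, if_true, hlt, Option.some.injEq] at h
        exact Or.inr ⟨h.symm, hq⟩
      · simp only [pvFStep, hq, if_true, hlt, if_false] at h
        exact Or.inl h
  · simp only [pvFStep, hq, Bool.false_eq_true, if_false] at h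
    exact Or.inl h

-- fold-of-max specification
theorem pvFold_spec (q : Int × Int × Int × Int → Bool) :
    ∀ (l : List (Int × Int × Int × Int)) (acc : Option (Int × Int × Int × Int)),
    (l.foldl (pvFStep q) acc = none → acc = none ∧ ∀ x ∈ l, q x = false)
    ∧ (∀ v, l.foldl (pvFStep q) acc = some v →
        (acc = some v ∨ (q v = true ∧ v ∈ l))
        ∧ (∀ x ∈ l, q x = true → pvKey x ≤ pvKey v)
        ∧ (∀ b, acc = some b → pvKey b ≤ pvKey v)) := by
  intro l
  induction l with
  | nil =>
    intro acc
    refine ⟨fun h => ⟨h, by simp⟩, fun v h => ?_⟩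
    simp only [List.foldl_nil] at h
    exact ⟨Or.inl h, by simp, fun b hb => by rw [h] at hb; cases hb; exact le_refl _⟩
  | cons x xs ih =>
    intro acc
    have hstep : (x :: xs).foldl (pvFStep q) acc = xs.foldl (pvFStep q) (pvFStep q acc x) := rfl
    constructor
    · intro h
      rw [hstep] at h
      obtain ⟨h1, h2⟩ := (ih (pvFStep q acc x)).1 h
      by_cases hq : q x = true
      · obtain ⟨c, hc, -, -⟩ := pvFStep_true q acc x hq
        rw [hc] at h1; cases h1
      · have hq' : q x = false := by simpa using hq
        rw [pvFStep_false q acc x hq'] at h1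
        refine ⟨h1, fun y hy => ?_⟩
        rcases List.mem_cons.mp hy with rfl | hy'
        · exact hq'
        · exact h2 y hy'
    · intro v h
      rw [hstep] at h
      obtain ⟨hsrc, hmax, hacc'⟩ := (ih (pvFStep q acc x)).2 v h
      have hxle : q x = true → pvKey x ≤ pvKey v := by
        intro hq
        obtain ⟨c, hc, hxc, -⟩ := pvFStep_true q acc x hq
        exact le_trans hxc (hacc' c hc)
      refine ⟨?_, ?_, ?_⟩
      · rcases hsrc with heq | ⟨hqv, hv⟩
        · rcases pvFStep_some q acc x v heq with hl | ⟨rfl, hqx⟩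
          · exact Or.inl hl
          · exact Or.inr ⟨hqx, List.mem_cons_self⟩
        · exact Or.inr ⟨hqv, List.mem_cons_of_mem _ hv⟩
      · intro y hy hqy
        rcases List.mem_cons.mp hy with rfl | hy'
        · exact hxle hqy
        · exact hmax y hy' hqy
      · intro b hb
        by_cases hq : q x = true
        · obtain ⟨c, hc, -, hbc⟩ := pvFStep_true q acc x hq
          exact le_trans (hbc b hb) (hacc' c hc)
        · have hq' : q x = false := by simpa using hq
          exact hacc' b (by rw [pvFStep_false q acc x hq', hb])

-- the fold-of-max over any list equals first-match on the reverse-sorted list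
theorem pvArgmax_eq (q : Int × Int × Int × Int → Bool) (l : List (Int × Int × Int × Int)) :
    l.foldl (pvFStep q) none = (PySem.List.sorted l pvKey true).find? q := by
  have hpw : List.Pairwise (fun a b => pvKey b ≤ pvKey a)
      (PySem.List.sorted l pvKey true) := by
    rw [pvSorted_inst l]; exact PySem.List.sorted_pairwise_rev l pvKey
  cases hfold : l.foldl (pvFStep q) none with
  | none =>
    obtain ⟨-, hall⟩ := (pvFold_spec q l none).1 hfold
    symm
    rw [List.find?_eq_none]
    intro x hx
    simp [hall x ((PySem.List.mem_sorted l pvKey true x).mp hx)]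
  | some v =>
    obtain ⟨hsrc, hmax, -⟩ := (pvFold_spec q l none).2 v hfold
    have hv : q v = true ∧ v ∈ l := by
      rcases hsrc with h | h
      · cases h
      · exact h
    cases hfind : (PySem.List.sorted l pvKey true).find? q with
    | none =>
      rw [List.find?_eq_none] at hfind
      exact absurd hv.1 (by
        simpa using hfind v ((PySem.List.mem_sorted l pvKey true v).mpr hv.2))
    | some w =>
      obtain ⟨hqw, as_, bs, hsplit, hprefail⟩ := List.find?_eq_some_iff_append.mp hfind
      have hwl : w ∈ l := by
        have : w ∈ PySem.List.sorted l pvKey true := by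
          rw [hsplit]; exact List.mem_append_right _ List.mem_cons_self
        exact (PySem.List.mem_sorted l pvKey true w).mp this
      have hle1 : pvKey w ≤ pvKey v := hmax w hwl hqw
      have hvs : v ∈ PySem.List.sorted l pvKey true :=
        (PySem.List.mem_sorted l pvKey true v).mpr hv.2
      rw [hsplit] at hvs hpw
      rcases List.mem_append.mp hvs with hvas | hvcons
      · exact absurd hv.1 (by simpa using hprefail v hvas)
      · rcases List.mem_cons.mp hvcons with rfl | hvbs
        · rfl
        · have hle2 : pvKey v ≤ pvKey w := by
            have hp2 := (List.pairwise_append.mp hpw).2.1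
            exact (List.pairwise_cons.mp hp2).1 v hvbs
          rw [pvKey_inj v w (le_antisymm hle2 hle1)]

-- characterisation of membership in the candidate list
theorem pvCands_lt (A : List (List Int)) (n : Int) :
    ∀ c ∈ pvCands A n, c.2.2.1 < c.2.2.2 := by
  intro c hc
  simp only [pvCands, List.mem_flatMap, List.mem_map, List.mem_filter,
    PySem.List.mem_pyRange_one] at hc
  obtain ⟨i, -, buy, -, sell, ⟨⟨h1, -⟩, -⟩, rfl⟩ := hc
  simpa using h1

-- compatibility is monotone under growing the used-interval list
theorem pvCompat_append_false (u : List (Int × Int)) (iv : Int × Int) (buy sell : Int)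
    (h : pvCompat u buy sell = false) : pvCompat (u ++ [iv]) buy sell = false := by
  unfold pvCompat at *
  rw [List.all_append]
  simp [h]

theorem pvCompat_self_false (u : List (Int × Int)) (buy sell : Int) (h : buy ≤ sell) :
    pvCompat (u ++ [(buy, sell)]) buy sell = false := by
  unfold pvCompat
  rw [List.all_append]
  simp only [List.all_cons, List.all_nil, Bool.and_eq_false_iff]
  right
  simp only [Bool.or_eq_false_iff, decide_eq_false_iff_not, not_lt]
  omega

-- size bound used to discharge the fuel
theorem pvCands_len (A : List (List Int)) (n : Int) :
    (pvCands A n).length ≤ A.length * n.toNat * n.toNat := by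
  unfold pvCands
  rw [List.length_flatMap]
  have hinner : ∀ x ∈ ((PySem.List.pyRange 0 (A.length : Int) 1).map (fun i =>
      ((PySem.List.pyRange 0 n 1).flatMap (fun buy =>
        ((PySem.List.pyRange (buy + 1) n 1).filter (fun sell =>
            decide (PySem.List.pyGetD (PySem.List.pyGetD A i []) sell 0
              - PySem.List.pyGetD (PySem.List.pyGetD A i []) buy 0 > 0))).map (fun sell =>
          (PySem.List.pyGetD (PySem.List.pyGetD A i []) sell 0
             - PySem.List.pyGetD (PySem.List.pyGetD A i []) buy 0, i, buy, sell)))).length)),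
      x ≤ n.toNat * n.toNat := by
    intro x hx
    obtain ⟨i, -, rfl⟩ := List.mem_map.mp hx
    rw [List.length_flatMap]
    have h2 : ∀ y ∈ ((PySem.List.pyRange 0 n 1).map (fun buy =>
        (((PySem.List.pyRange (buy + 1) n 1).filter (fun sell =>
            decide (PySem.List.pyGetD (PySem.List.pyGetD A i []) sell 0
              - PySem.List.pyGetD (PySem.List.pyGetD A i []) buy 0 > 0))).map (fun sell =>
          (PySem.List.pyGetD (PySem.List.pyGetD A i []) sell 0
             - PySem.List.pyGetD (PySem.List.pyGetD A i []) buy 0, i, buy, sell))).length)),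
        y ≤ n.toNat := by
      intro y hy
      obtain ⟨buy, hbuy, rfl⟩ := List.mem_map.mp hy
      rw [PySem.List.mem_pyRange_one] at hbuy
      calc _ ≤ (PySem.List.pyRange (buy + 1) n 1).length := by
              rw [List.length_map]; exact List.length_filter_le _ _
        _ ≤ n.toNat := by rw [PySem.List.length_pyRange_one]; omega
    calc _ ≤ _ := List.sum_le_card_nsmul _ _ h2
      _ ≤ n.toNat * n.toNat := by
          simp only [smul_eq_mul, List.length_map, PySem.List.length_pyRange_one]
          exact Nat.mul_le_mul_right _ (by omega)
  calc _ ≤ _ := List.sum_le_card_nsmul _ _ hinner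
    _ ≤ A.length * n.toNat * n.toNat := by
        simp only [smul_eq_mul, List.length_map, PySem.List.length_pyRange_one]
        rw [Nat.mul_assoc]
        exact Nat.mul_le_mul_right _ (by omega)

-- the scan of the sorted candidate list equals Source B's repeated re-scan loop
theorem pvScan_eq_fuel (A : List (List Int)) (n k : Int) :
    ∀ (s' pre : List (Int × Int × Int × Int)) (used : List (Int × Int))
      (out : List (Int × Int × Int)) (fuel : Nat),
    pre ++ s' = PySem.List.sorted (pvCands A n) pvKey true →
    (∀ c ∈ pre, pvCompat used c.2.2.1 c.2.2.2 = false) →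
    s'.length < fuel →
    pvScan k s' used out = pvLoopBfuel A n k fuel used out := by
  intro s'
  induction s' with
  | nil =>
    intro pre used out fuel hsplit hpre hfuel
    cases fuel with
    | zero => omega
    | succ f =>
      have hbest : pvBestCand A n used = none := by
        rw [pvBest_eq_foldl, pvArgmax_eq, ← hsplit, List.find?_eq_none]
        intro x hx
        simp only [List.append_nil] at hx
        simp [hpre x hx]
      simp [pvScan, pvLoopBfuel, hbest]
  | cons c rest ih =>
    intro pre used out fuel hsplit hpre hfuel
    obtain ⟨g, i, buy, sell⟩ := c
    have hbuysell : buy < sell := by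
      have hmem : (g, i, buy, sell) ∈ pvCands A n := by
        have : (g, i, buy, sell) ∈ PySem.List.sorted (pvCands A n) pvKey true := by
          rw [← hsplit]; exact List.mem_append_right _ List.mem_cons_self
        exact (PySem.List.mem_sorted _ _ _ _).mp this
      exact pvCands_lt A n _ hmem
    by_cases hq : pvCompat used buy sell = true
    · cases fuel with
      | zero => omega
      | succ f =>
        have hbest : pvBestCand A n used = some (g, i, buy, sell) := by
          rw [pvBest_eq_foldl, pvArgmax_eq, ← hsplit]
          apply List.find?_eq_some_iff_append.mpr
          exact ⟨hq, pre, rest, rfl, fun a ha => by simp [hpre a ha]⟩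
        simp only [pvScan, hq, if_true, pvLoopBfuel, hbest]
        split
        · rfl
        · apply ih (pre ++ [(g, i, buy, sell)])
          · simpa [List.append_assoc] using hsplit
          · intro c hc
            rcases List.mem_append.mp hc with hc' | hc'
            · exact pvCompat_append_false _ _ _ _ (hpre c hc')
            · simp only [List.mem_singleton] at hc'
              subst hc'
              exact pvCompat_self_false used buy sell (le_of_lt hbuysell)
          · simp only [List.length_cons] at hfuel; omega
    · have hq' : pvCompat used buy sell = false := by simpa using hq
      simp only [pvScan, hq', Bool.false_eq_true, if_false]
      apply ih (pre ++ [(g, i, buy, sell)])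
      · simpa [List.append_assoc] using hsplit
      · intro c hc
        rcases List.mem_append.mp hc with hc' | hc'
        · exact hpre c hc'
        · simp only [List.mem_singleton] at hc'
          subst hc'
          exact hq'
      · simp only [List.length_cons] at hfuel; omega

-- day-set membership test of A ↔ interval test of the scan
theorem pv_cond_eq (buy sell : Int) (used : PySem.Set Int) (ivs : List (Int × Int))
    (hbs : buy ≤ sell)
    (hivs : ∀ iv ∈ ivs, iv.1 ≤ iv.2)
    (hmem : ∀ d : Int, d ∈ used ↔ ∃ iv ∈ ivs, iv.1 ≤ d ∧ d ≤ iv.2) :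
    ((PySem.List.pyRange buy (sell + 1) 1).all (fun day => !(PySem.Set.contains used day)))
      = pvCompat ivs buy sell := by
  rw [Bool.eq_iff_iff]
  unfold pvCompat
  simp only [List.all_eq_true, PySem.List.mem_pyRange_one, Bool.not_eq_eq_eq_not,
    Bool.not_true, Bool.or_eq_true, decide_eq_true_eq,
    ← Bool.not_eq_true, PySem.Set.contains_iff]
  constructor
  · intro h iv hiv
    by_contra hc
    rw [not_or] at hc
    have hiv2 := hivs iv hiv
    have hd := h (max buy iv.1) (by constructor <;> omega)
    exact hd ((hmem _).mpr ⟨iv, hiv, by omega, by omega⟩)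
  · intro h d hd hdu
    obtain ⟨iv, hiv, h1, h2⟩ := (hmem d).mp hdu
    have hiv2 := hivs iv hiv
    rcases h iv hiv with h3 | h3 <;> omega

-- A's day-set loop equals the interval scan
theorem pvLoop_eq (k : Int) (ps : List (Int × Int × Int × Int))
    (hps : ∀ p ∈ ps, p.2.2.1 ≤ p.2.2.2) :
    ∀ (used : PySem.Set Int) (ivs : List (Int × Int)) (out : List (Int × Int × Int))
    (count : Int), count = (out.length : Int) →
    (∀ iv ∈ ivs, iv.1 ≤ iv.2) →
    (∀ d : Int, d ∈ used ↔ ∃ iv ∈ ivs, iv.1 ≤ d ∧ d ≤ iv.2) →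
    pvLoopA k ps used count out = pvScan k ps ivs out := by
  induction ps with
  | nil => intros; rfl
  | cons p rest ih =>
    obtain ⟨profit, i, buy, sell⟩ := p
    intro used ivs out count hcount hivs hmem
    have hbs : buy ≤ sell := hps _ (List.mem_cons_self)
    simp only [pvLoopA, pvScan]
    rw [pv_cond_eq buy sell used ivs hbs hivs hmem]
    split
    · rename_i hcond
      have hlen : ((out ++ [(i + 1, buy + 1, sell + 1)]).length : Int) = count + 1 := by
        simp [hcount]
      rw [← hlen]
      split
      · rfl
      · apply ih (fun p hp => hps p (List.mem_cons_of_mem _ hp))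
        · rfl
        · intro iv hiv
          rcases List.mem_append.mp hiv with h | h
          · exact hivs iv h
          · simp at h; subst h; exact hbs
        · intro d
          rw [PySem.Set.mem_update, hmem, PySem.List.mem_pyRange_one]
          constructor
          · rintro (⟨iv, hiv, h1, h2⟩ | ⟨h1, h2⟩)
            · exact ⟨iv, List.mem_append_left _ hiv, h1, h2⟩
            · exact ⟨(buy, sell), List.mem_append_right _ (by simp), by omega, by omega⟩
          · rintro ⟨iv, hiv, h1, h2⟩
            rcases List.mem_append.mp hiv with h | h
            · exact Or.inl ⟨iv, h, h1, h2⟩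
            · simp at h; subst h; right; omega
    · exact ih (fun p hp => hps p (List.mem_cons_of_mem _ hp)) used ivs out count hcount hivs hmem

-- ===== VERDICT (by name: the statement is the Claim_ definition above) =====
theorem dp_problem2_n2k_spec : Claim_equal_dp_problem2_n2k := by
  intro A k _ _
  unfold Spec_dp_problem2_n2k dp_problem2_n2k dp_problem2_n2k_alt
  simp only []
  rw [pvGen_eq]
  set n : Int := (((PySem.List.pyGet? A 0).getD []).length : Int) with hn
  set s := PySem.List.sorted (pvCands A n) pvKey true with hs
  have hall : ∀ p ∈ s, p.2.2.1 ≤ p.2.2.2 := by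
    intro p hp
    rw [hs, PySem.List.mem_sorted] at hp
    exact le_of_lt (pvCands_lt A n p hp)
  have hsorted_key : PySem.List.sorted (pvCands A n)
      (fun p => [p.1, p.2.1, p.2.2.1, p.2.2.2]) true = s := rfl
  rw [hsorted_key]
  have hloop := pvLoop_eq k s hall PySem.Set.empty [] [] 0 (by simp) (by simp)
      (by intro d; simp [PySem.Set.empty])
  rw [hloop]
  have hfuel : s.length < A.length * n.toNat * n.toNat + 1 := by
    rw [hs, PySem.List.length_sorted]
    exact Nat.lt_succ_of_le (pvCands_len A n)
  have hscan := pvScan_eq_fuel A n k s [] [] []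
      (A.length * n.toNat * n.toNat + 1) (by simp [hs]) (by simp) hfuel
  rw [hscan]
  split
  · rename_i h; exact h.symm
  · rfl
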